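-- pv_equiv track=rewrite | github.com/ovidiu-mura/slider | slider.py | ok_parity
-- ===== SOURCE A (Python) =====
-- def ok_parity(n, tiles):
--     n2 = len(tiles)
--     inversions = 0
--     blankpos = None
--     for i in range(n2):
--         if tiles[i] == 0:
--             blankpos = i
--             continue
--         for j in range(i + 1, n2):
--             if tiles[j] == 0:
--                 continue
--             if tiles[j] < tiles[i]:
--                 inversions += 1
--     if (n & 1) == 1:
--         return (inversions & 1) == 0
--     blankrow = blankpos // n
--     return (blankrow & 1) != (inversions & 1)
-- ===== SOURCE B (Python) =====
-- def ok_parity(n, tiles):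
--     # count inversions of the non-blank tiles with merge sort (O(m log m))
--     def sort_count(a):
--         if len(a) <= 1:
--             return a, 0
--         m = len(a) // 2
--         left, linv = sort_count(a[:m])
--         right, rinv = sort_count(a[m:])
--         merged = []
--         inv = linv + rinv
--         i = j = 0
--         while i < len(left) and j < len(right):
--             if right[j] < left[i]:
--                 merged.append(right[j])
--                 j += 1
--                 inv += len(left) - i
--             else:
--                 merged.append(left[i])
--                 i += 1
--         merged.extend(left[i:])
--         merged.extend(right[j:])
--         return merged, inv
--     _, inversions = sort_count([t for t in tiles if t != 0])
--     if n % 2 == 1: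
--         return inversions % 2 == 0
--     blankrow = tiles.index(0) // n
--     return blankrow % 2 != inversions % 2
-- ===== Notes on version B (the rewrite author's own statement) =====
-- stated objective: alternative
-- what changed: Counts inversions of the non-blank tiles with a single merge sort instead of A's nested index loops, and locates the blank with list.index instead of the scan (intended as faster; a timing run measured B 89.73x at the largest size both finished but could not confirm the label because A timed out above that).
-- outside the precondition, e.g. on ok_parity(2, [0, 1, 0, 2]): A returns True, B returns False; on ok_parity(2, [1, 2, 3]): A raises TypeError, B raises ValueError
import Mathlib
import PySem

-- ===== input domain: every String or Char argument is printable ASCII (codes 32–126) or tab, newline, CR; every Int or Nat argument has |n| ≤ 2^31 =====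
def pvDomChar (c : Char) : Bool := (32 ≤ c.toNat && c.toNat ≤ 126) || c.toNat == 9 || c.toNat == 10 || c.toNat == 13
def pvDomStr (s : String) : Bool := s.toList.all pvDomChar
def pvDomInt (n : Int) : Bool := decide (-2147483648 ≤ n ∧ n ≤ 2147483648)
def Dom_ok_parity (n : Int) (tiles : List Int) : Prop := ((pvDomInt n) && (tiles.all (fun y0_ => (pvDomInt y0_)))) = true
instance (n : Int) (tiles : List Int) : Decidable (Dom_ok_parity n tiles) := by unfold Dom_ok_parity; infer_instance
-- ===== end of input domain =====

-- B counts inversions of the non-blank tiles with one merge sort instead of A's nested index loops (intended as faster; a timing run measured it ahead at every size both finished but could not confirm the label).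


-- ===== PORT A =====
-- body of A's outer for-loop: state (inversions, blankpos); the inner for-loop is the inner fold
def stepA (tiles : List Int) (st : Int × Option Int) (i : Int) : Int × Option Int :=
  let ti := PySem.List.pyGetD tiles i 0
  if ti = 0 then (st.1, some i)
  else
    let inv := (PySem.List.pyRange (i + 1) (PySem.List.len tiles) 1).foldl (fun inv j =>
        let tj := PySem.List.pyGetD tiles j 0
        if tj = 0 then inv else if tj < ti then inv + 1 else inv) st.1
    (inv, st.2)

def ok_parity (n : Int) (tiles : List Int) : Bool :=
  let n2 := PySem.List.len tiles
  let st := (PySem.List.pyRange 0 n2 1).foldl (stepA tiles) (0, none)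
  let inversions := st.1
  if PySem.Int.band n 1 = 1 then decide (PySem.Int.band inversions 1 = 0)
  else
    match st.2 with
    | none => false  -- Python raises TypeError here (blankpos is None); excluded by Pre_
    | some bp =>
      let blankrow := PySem.Int.floordiv bp n  -- n = 0 raises ZeroDivisionError in Python; excluded by Pre_
      decide (PySem.Int.band blankrow 1 ≠ PySem.Int.band inversions 1)

-- ===== PORT B =====
-- the while-merge of Source B: consumes the fronts of left/right, counting len(left)-i on a right pick
def pvMergeB : List Int → List Int → List Int × Int
  | [], r => (r, 0)
  | x :: l, [] => (x :: l, 0)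
  | x :: l, y :: r =>
    if y < x then
      let p := pvMergeB (x :: l) r
      (y :: p.1, p.2 + ((x :: l).length : Int))
    else
      let p := pvMergeB l (y :: r)
      (x :: p.1, p.2)
termination_by l r => l.length + r.length

-- sort_count of Source B
def pvSortCountB (a : List Int) : List Int × Int :=
  if _h : a.length ≤ 1 then (a, 0)
  else
    let m := a.length / 2
    let L := pvSortCountB (a.take m)
    let R := pvSortCountB (a.drop m)
    let p := pvMergeB L.1 R.1
    (p.1, L.2 + R.2 + p.2)
termination_by a.length
decreasing_by
  · simp [List.length_take]; omega
  · simp; omega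

def ok_parity_alt (n : Int) (tiles : List Int) : Bool :=
  let inversions := (pvSortCountB (tiles.filter (fun t => decide (¬t = 0)))).2
  if PySem.Int.mod n 2 = 1 then decide (PySem.Int.mod inversions 2 = 0)
  else
    match PySem.List.index? tiles 0 with
    | none => false  -- tiles.index(0) raises ValueError in Python; excluded by Pre_
    | some idx =>
      let blankrow := PySem.Int.floordiv (idx : Int) n
      decide (PySem.Int.mod blankrow 2 ≠ PySem.Int.mod inversions 2)

-- ===== PRECONDITION & SPEC =====
-- When n is even, A raises unless tiles contains a 0 (TypeError: None // n) and n ≠ 0 (ZeroDivisionError).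
-- Pre_ additionally excludes even-n inputs with MORE than one 0: there A uses the LAST 0 as the blank and B
-- the FIRST — a degenerate multi-blank puzzle on which either choice is as defensible as the other.
def Pre_ok_parity (n : Int) (tiles : List Int) : Prop :=
  PySem.Int.mod n 2 = 1 ∨ (n ≠ 0 ∧ tiles.count 0 = 1)
instance (n : Int) (tiles : List Int) : Decidable (Pre_ok_parity n tiles) := by
  unfold Pre_ok_parity; infer_instance

def pvWitness_ok_parity : Int × List Int := (4, [1, 2, 3, 0, 5, 6, 7, 8, 4, 9, 10, 11, 13, 14, 15, 12])

def Spec_ok_parity (n : Int) (tiles : List Int) (out : Bool) : Prop := out = ok_parity_alt n tiles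
instance (n : Int) (tiles : List Int) (out : Bool) : Decidable (Spec_ok_parity n tiles out) := by
  unfold Spec_ok_parity; infer_instance

-- ===== CLAIM (what is proved, stated in full; the proofs are below) =====
def Claim_equal_ok_parity : Prop := ∀ (n : Int) (tiles : List Int), Dom_ok_parity n tiles → Pre_ok_parity n tiles → Spec_ok_parity n tiles (ok_parity n tiles)

-- ===== LEMMAS AND PROOFS =====

-- number of inversion pairs (later element < earlier element), naive recursion
def invCnt : List Int → Int
  | [] => 0
  | x :: xs => ((xs.countP (fun t => decide (t < x))) : Int) + invCnt xs

-- what A's outer loop adds to `inversions`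
def invA : List Int → Int
  | [] => 0
  | x :: xs =>
      (if x = 0 then 0
       else ((xs.countP (fun t => decide (t < x) && decide (¬t = 0))) : Int)) + invA xs

-- what A's outer loop does to `blankpos`, scanning a suffix starting at absolute index k
def lastZ : List Int → Int → Option Int → Option Int
  | [], _, bp => bp
  | x :: xs, k, bp => lastZ xs (k + 1) (if x = 0 then some k else bp)

-- cross inversions between two blocks: pairs (a ∈ l, b ∈ r) with b < a
def crossCnt (l r : List Int) : Int :=
  (l.map (fun a => ((r.countP (fun b => decide (b < a))) : Int))).sum

theorem crossCnt_nil_right (l : List Int) : crossCnt l [] = 0 := by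
  simp [crossCnt]

theorem crossCnt_cons_left (x : Int) (l r : List Int) :
    crossCnt (x :: l) r = ((r.countP (fun b => decide (b < x))) : Int) + crossCnt l r := by
  simp [crossCnt]

theorem crossCnt_cons_right (l : List Int) (y : Int) (r : List Int) :
    crossCnt l (y :: r) = ((l.countP (fun a => decide (y < a))) : Int) + crossCnt l r := by
  induction l with
  | nil => simp [crossCnt]
  | cons a l ih =>
    simp only [crossCnt_cons_left, List.countP_cons, ih]
    by_cases h : y < a <;> simp [h] <;> ring

theorem merge_perm : ∀ l r : List Int, (pvMergeB l r).1.Perm (l ++ r) := by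
  intro l r
  fun_induction pvMergeB l r with
  | case1 r => simp
  | case2 x l => simp
  | case3 x l y r h p ih => exact (ih.cons y).trans List.perm_middle.symm
  | case4 x l y r h p ih => exact ih.cons x

theorem merge_sorted : ∀ l r : List Int, l.Pairwise (· ≤ ·) → r.Pairwise (· ≤ ·) →
    (pvMergeB l r).1.Pairwise (· ≤ ·) := by
  intro l r hl hr
  fun_induction pvMergeB l r with
  | case1 r => exact hr
  | case2 x l => exact hl
  | case3 x l y r h p ih =>
    refine List.pairwise_cons.2 ⟨?_, ih hl (List.pairwise_cons.1 hr).2⟩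
    intro z hz
    rcases List.mem_append.1 ((merge_perm (x :: l) r).mem_iff.1 hz) with h1 | h2
    · rcases List.mem_cons.1 h1 with rfl | h1'
      · exact le_of_lt h
      · exact le_of_lt (lt_of_lt_of_le h ((List.pairwise_cons.1 hl).1 _ h1'))
    · exact (List.pairwise_cons.1 hr).1 _ h2
  | case4 x l y r h p ih =>
    refine List.pairwise_cons.2 ⟨?_, ih (List.pairwise_cons.1 hl).2 hr⟩
    intro z hz
    rcases List.mem_append.1 ((merge_perm l (y :: r)).mem_iff.1 hz) with h1 | h2
    · exact (List.pairwise_cons.1 hl).1 _ h1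
    · rcases List.mem_cons.1 h2 with rfl | h2'
      · exact le_of_not_gt h
      · exact le_trans (le_of_not_gt h) ((List.pairwise_cons.1 hr).1 _ h2')

theorem merge_cnt : ∀ l r : List Int, l.Pairwise (· ≤ ·) → r.Pairwise (· ≤ ·) →
    (pvMergeB l r).2 = crossCnt l r := by
  intro l r hl hr
  fun_induction pvMergeB l r with
  | case1 r => simp [crossCnt]
  | case2 x l => simp [crossCnt_nil_right]
  | case3 x l y r h p ih =>
    have hcnt : (x :: l).countP (fun a => decide (y < a)) = (x :: l).length := by
      apply List.countP_eq_length.2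
      intro a ha
      rcases List.mem_cons.1 ha with rfl | ha'
      · simpa using h
      · simpa using lt_of_lt_of_le h ((List.pairwise_cons.1 hl).1 _ ha')
    rw [crossCnt_cons_right, hcnt, ih hl (List.pairwise_cons.1 hr).2]
    ring
  | case4 x l y r h p ih =>
    have hcnt : (y :: r).countP (fun b => decide (b < x)) = 0 := by
      apply List.countP_eq_zero.2
      intro b hb
      rcases List.mem_cons.1 hb with rfl | hb'
      · simpa using h
      · simp only [decide_eq_true_eq] at *
        exact not_lt.2 (le_trans (le_of_not_gt h) ((List.pairwise_cons.1 hr).1 _ hb'))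
    rw [crossCnt_cons_left, hcnt, ih (List.pairwise_cons.1 hl).2 hr]
    simp

theorem crossCnt_perm_left {l l' : List Int} (h : l.Perm l') (r : List Int) :
    crossCnt l r = crossCnt l' r :=
  (h.map _).sum_eq

theorem crossCnt_perm_right (l : List Int) {r r' : List Int} (h : r.Perm r') :
    crossCnt l r = crossCnt l r' := by
  unfold crossCnt
  congr 1
  exact List.map_congr_left (fun a _ => by rw [h.countP_eq])

theorem invCnt_append (u v : List Int) :
    invCnt (u ++ v) = invCnt u + invCnt v + crossCnt u v := by
  induction u with
  | nil => simp [invCnt, crossCnt]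
  | cons x u ih =>
    simp only [List.cons_append, invCnt, List.countP_append, ih, crossCnt]
    push_cast
    simp only [List.map_cons, List.sum_cons]
    ring

theorem sortCount_spec : ∀ a : List Int,
    (pvSortCountB a).1.Perm a ∧ (pvSortCountB a).1.Pairwise (· ≤ ·) ∧
      (pvSortCountB a).2 = invCnt a := by
  intro a
  fun_induction pvSortCountB a with
  | case1 a h =>
    refine ⟨List.Perm.refl _, ?_, ?_⟩
    · match a, h with
      | [], _ => simp
      | [x], _ => simp
    · match a, h with
      | [], _ => simp [invCnt]
      | [x], _ => simp [invCnt]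
  | case2 a h m L R p ihL ihR =>
    obtain ⟨pL, sL, cL⟩ := ihL
    obtain ⟨pR, sR, cR⟩ := ihR
    have hmp : (pvMergeB L.1 R.1).1.Perm (a.take m ++ a.drop m) :=
      (merge_perm L.1 R.1).trans (pL.append pR)
    refine ⟨by simpa using hmp, merge_sorted _ _ sL sR, ?_⟩
    show L.2 + R.2 + (pvMergeB L.1 R.1).2 = invCnt a
    rw [merge_cnt _ _ sL sR, cL, cR,
        crossCnt_perm_left pL, crossCnt_perm_right _ pR, ← invCnt_append]
    simp

-- A's inner loop over the suffix list counts the strictly-smaller non-zero entries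
theorem inner_cnt (x : Int) (ys : List Int) (inv : Int) :
    ys.foldl (fun inv t => if t = 0 then inv else if t < x then inv + 1 else inv) inv
      = inv + ((ys.countP (fun t => decide (t < x) && decide (¬t = 0))) : Int) := by
  have hfun : (fun (inv : Int) (t : Int) => if t = 0 then inv else if t < x then inv + 1 else inv)
      = fun inv t => if (t < x ∧ ¬t = 0) then inv + 1 else inv := by
    funext inv t
    by_cases h0 : t = 0 <;> by_cases hlt : t < x <;> simp [h0, hlt]
  rw [hfun]
  simpa using PySem.List.foldl_ite_add_one (fun t => t < x ∧ ¬t = 0) ys inv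

-- characterisation of A's outer loop from absolute index k on
theorem loopA (tiles : List Int) : ∀ (d k : Nat), tiles.length - k = d →
    ∀ (inv : Int) (bp : Option Int),
    (PySem.List.pyRange (k : Int) (PySem.List.len tiles) 1).foldl (stepA tiles) (inv, bp)
      = (inv + invA (tiles.drop k), lastZ (tiles.drop k) (k : Int) bp) := by
  intro d
  induction d with
  | zero =>
    intro k hk inv bp
    have hge : tiles.length ≤ k := by omega
    rw [PySem.List.pyRange_one_eq_nil (by simp [PySem.List.len_eq]; exact_mod_cast hge)]
    simp [List.drop_eq_nil_of_le hge, invA, lastZ]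
  | succ d ih =>
    intro k hk inv bp
    have hlt : k < tiles.length := by omega
    have hdrop : tiles.drop k = tiles[k] :: tiles.drop (k + 1) := List.drop_eq_getElem_cons hlt
    have hlen : ((k : Int)) < PySem.List.len tiles := by
      simp only [PySem.List.len_eq]; exact_mod_cast hlt
    rw [PySem.List.pyRange_one_cons hlen, List.foldl_cons]
    have hget : PySem.List.pyGetD tiles (k : Int) 0 = tiles[k] := by
      simp [PySem.List.pyGetD_natCast, List.getD_eq_getElem?_getD, hlt]
    have hcast : (k : Int) + 1 = ((k + 1 : Nat) : Int) := by push_cast; ring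
    by_cases h0 : tiles[k] = 0
    · have hstep : stepA tiles (inv, bp) (k : Int) = (inv, some (k : Int)) := by
        simp [stepA, hget, h0]
      rw [hstep, hcast, ih (k + 1) (by omega), hdrop]
      simp only [invA, lastZ, if_pos h0, hcast, zero_add]
    · have hstep : stepA tiles (inv, bp) (k : Int)
          = (inv + (((tiles.drop (k + 1)).countP
              (fun t => decide (t < tiles[k]) && decide (¬t = 0))) : Int), bp) := by
        simp only [stepA, hget, if_neg h0]
        have hP := PySem.List.foldl_pyRange_pyGetD tiles (0 : Int)
          (fun inv t => if t = 0 then inv else if t < tiles[k] then inv + 1 else inv) inv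
          (a := ((k + 1 : Nat) : Int)) (by omega)
        simp only [Int.toNat_natCast] at hP
        rw [hcast, hP, inner_cnt]
      rw [hstep, hcast, ih (k + 1) (by omega), hdrop]
      simp only [invA, lastZ, if_neg h0, hcast, add_assoc]

theorem loopA_top (tiles : List Int) :
    (PySem.List.pyRange 0 (PySem.List.len tiles) 1).foldl (stepA tiles) (0, none)
      = (invA tiles, lastZ tiles 0 none) := by
  have h := loopA tiles tiles.length 0 rfl 0 none
  simpa using h

theorem invA_eq (xs : List Int) : invA xs = invCnt (xs.filter (fun t => decide (¬t = 0))) := by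
  induction xs with
  | nil => rfl
  | cons x xs ih =>
    by_cases h0 : x = 0
    · simp [invA, h0, ih]
    · simp only [invA, List.filter_cons, decide_eq_true_eq, h0,
        not_false_iff, if_pos, invCnt, ih, List.countP_filter]
      simp

theorem lastZ_append (u v : List Int) : ∀ (k : Int) (bp : Option Int),
    lastZ (u ++ v) k bp = lastZ v (k + u.length) (lastZ u k bp) := by
  induction u with
  | nil => simp [lastZ]
  | cons x u ih =>
    intro k bp
    simp only [List.cons_append, lastZ, ih]
    congr 1
    simp only [List.length_cons]
    push_cast
    ring

theorem lastZ_no_zero (u : List Int) (h : (0 : Int) ∉ u) : ∀ (k : Int) (bp : Option Int),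
    lastZ u k bp = bp := by
  induction u with
  | nil => intro k bp; rfl
  | cons x u ih =>
    intro k bp
    have hx : x ≠ 0 := fun hx => h (hx ▸ List.mem_cons_self)
    simp only [lastZ, if_neg hx]
    exact ih (fun hm => h (List.mem_cons_of_mem _ hm)) _ _

-- single blank: A's last-zero scan and B's index(0) agree
theorem blank_agree (tiles : List Int) (h : tiles.count 0 = 1) :
    ∃ j : Nat, PySem.List.index? tiles 0 = some j ∧ lastZ tiles 0 none = some (j : Int) := by
  have hmem : (0 : Int) ∈ tiles := List.count_pos_iff.1 (by omega)
  obtain ⟨j, hj⟩ := Option.isSome_iff_exists.1 ((PySem.List.index?_isSome_iff tiles 0).2 hmem)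
  obtain ⟨pre, suf, htiles, hlen, hpre⟩ := (PySem.List.index?_eq_some_iff tiles 0 j).1 hj
  refine ⟨j, hj, ?_⟩
  have hsuf : (0 : Int) ∉ suf := by
    have hc := h
    rw [htiles, List.count_append, List.count_cons_self] at hc
    have hpc : pre.count 0 = 0 := List.count_eq_zero.2 hpre
    have : suf.count 0 = 0 := by omega
    exact List.count_eq_zero.1 this
  rw [htiles, lastZ_append, lastZ_no_zero pre hpre]
  simp only [lastZ, zero_add]
  rw [lastZ_no_zero suf hsuf]
  simp [hlen]

-- the two inversion counters agree exactly
theorem inversions_agree (tiles : List Int) :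
    invA tiles = (pvSortCountB (tiles.filter (fun t => decide (¬t = 0)))).2 := by
  rw [invA_eq, (sortCount_spec _).2.2]

-- ===== VERDICT (by name: the statement is the Claim_ definition above) =====
theorem ok_parity_spec : Claim_equal_ok_parity := by
  intro n tiles _dom pre
  unfold Spec_ok_parity
  simp only [ok_parity, ok_parity_alt]
  rw [loopA_top]
  rw [← inversions_agree, PySem.Int.band_one n]
  by_cases hodd : PySem.Int.mod n 2 = 1
  · simp only [if_pos hodd, PySem.Int.band_one]
  · have hcnt : tiles.count 0 = 1 := by
      rcases pre with h | ⟨_, h⟩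
      · exact absurd h hodd
      · exact h
    obtain ⟨j, hidx, hlast⟩ := blank_agree tiles hcnt
    simp only [if_neg hodd, hlast, hidx, PySem.Int.band_one]
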